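-- pv_equiv track=rewrite | github.com/xjfcnfw3/algorithm | samsung/수의 새로운 연산.py | get_star
-- ===== SOURCE A (Python) =====
-- def get_star(x, y):
--     n = x + y - 1
--     result = 1
--     for i in range(1, n):
--         result += i
--     while n != y:
--         n -= 1
--         result += 1
--     return result
-- ===== SOURCE B (Python) =====
-- def get_star(x, y):
--     n = x + y - 1
--     tri = n * (n - 1) // 2 if n >= 2 else 0
--     return x + tri
-- ===== Notes on version B (the rewrite author's own statement) =====
-- stated objective: faster
-- what changed: Replaces the O(x+y) summation loop and the O(x) decrement while-loop by the closed-form x + n(n-1)/2 with n = x+y-1.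
import Mathlib
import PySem

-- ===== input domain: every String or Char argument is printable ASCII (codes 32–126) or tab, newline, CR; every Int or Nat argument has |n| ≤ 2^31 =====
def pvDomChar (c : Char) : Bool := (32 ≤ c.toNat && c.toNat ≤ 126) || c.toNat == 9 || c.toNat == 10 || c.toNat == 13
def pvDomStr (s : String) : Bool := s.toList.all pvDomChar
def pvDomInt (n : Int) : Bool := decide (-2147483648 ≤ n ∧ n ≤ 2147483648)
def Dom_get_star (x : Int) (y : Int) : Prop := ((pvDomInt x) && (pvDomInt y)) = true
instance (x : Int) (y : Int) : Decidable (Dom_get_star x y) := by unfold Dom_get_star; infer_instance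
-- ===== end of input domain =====

-- ===== PORT A =====
-- the Python while-loop 'while n != y: n -= 1; result += 1' runs exactly (n-y) steps
-- when it terminates (n ≥ y); ported as recursion on that count, carrying (n, result).
def get_star_while : Nat → Int → Int → Int
  | 0, _, r => r
  | k+1, n, r => get_star_while k (n-1) (r+1)

def get_star (x : Int) (y : Int) : Int :=
  let n := x + y - 1
  let result := (PySem.List.pyRange 1 n 1).foldl (fun acc i => acc + i) 1
  get_star_while (n - y).toNat n result

-- ===== PORT B =====
def get_star_alt (x : Int) (y : Int) : Int :=
  let n := x + y - 1
  let tri := if 2 ≤ n then PySem.Int.floordiv (n * (n - 1)) 2 else 0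
  x + tri

-- ===== PRECONDITION & SPEC =====
-- Pre_ excludes x < 1, on which A's while-loop never terminates (n starts below y and only decreases).
def Pre_get_star (x : Int) (y : Int) : Prop := 1 ≤ x
instance (x : Int) (y : Int) : Decidable (Pre_get_star x y) := by unfold Pre_get_star; infer_instance
def pvWitness_get_star : Int × Int := (3, 4)

def Spec_get_star (x : Int) (y : Int) (out : Int) : Prop := out = get_star_alt x y
instance (x : Int) (y : Int) (out : Int) : Decidable (Spec_get_star x y out) := by unfold Spec_get_star; infer_instance

-- ===== CLAIM (what is proved, stated in full; the proofs are below) =====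
def Claim_equal_get_star : Prop := ∀ (x : Int) (y : Int), Dom_get_star x y → Pre_get_star x y → Spec_get_star x y (get_star x y)

-- ===== LEMMAS AND PROOFS =====
theorem get_star_while_eq (k : Nat) : ∀ (n r : Int), get_star_while k n r = r + k := by
  induction k with
  | zero => intro n r; simp [get_star_while]
  | succ k ih => intro n r; simp [get_star_while, ih]; ring

theorem foldl_add_pyRange_one (n : Int) (c : Int) :
    (PySem.List.pyRange 1 n 1).foldl (fun acc i => acc + i) c
      = c + (if 2 ≤ n then PySem.Int.floordiv (n * (n - 1)) 2 else 0) := by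
  rcases le_or_gt n 1 with h | h
  · rw [PySem.List.pyRange_one_eq_nil h]
    simp; omega
  · -- n ≥ 2: induction on (n-1).toNat
    have h2 : 2 ≤ n := by omega
    obtain ⟨m, hm⟩ : ∃ m : Nat, n = (m : Int) + 2 := ⟨(n-2).toNat, by omega⟩
    subst hm
    rw [if_pos h2, PySem.Int.floordiv_eq_ediv_of_pos (by omega)]
    clear h h2
    induction m generalizing c with
    | zero =>
      rw [show ((0:Nat):Int) + 2 = 1 + 1 by norm_num, PySem.List.pyRange_one_singleton]
      simp [List.foldl]
    | succ m ih =>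
      rw [show ((m+1:Nat):Int) + 2 = ((m:Nat):Int) + 2 + 1 by push_cast; ring,
          PySem.List.pyRange_one_succ_right (by push_cast; omega), List.foldl_append, ih]
      simp [List.foldl]
      have hsplit : ((m:Int) + 2 + 1) * ((m:Int) + 2) = ((m:Int) + 2) * ((m:Int) + 2 - 1) + ((m:Int) + 2) * 2 := by ring
      rw [hsplit, Int.add_mul_ediv_right _ _ (by norm_num : (2:Int) ≠ 0)]
      ring

-- ===== VERDICT (by name: the statement is the Claim_ definition above) =====
theorem get_star_spec : Claim_equal_get_star := by
  intro x y _ hpre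
  unfold Spec_get_star get_star get_star_alt
  simp only []
  rw [foldl_add_pyRange_one, get_star_while_eq]
  have : ((x + y - 1 - y).toNat : Int) = x - 1 := by unfold Pre_get_star at hpre; omega
  rw [this]
  ring
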